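-- pv_equiv track=rewrite | github.com/rahdirs11/Geekster | 18March/mazeDP.py | mazeStepsBU
-- ===== SOURCE A (Python) =====
-- def mazeStepsBU(destRow: int, destCol: int) -> int:
--     dp = [[0 for _ in range(destCol + 1)] for _ in range(destRow + 1)]
--     for i in range(destRow, -1, -1):
--         for j in range(destCol, -1, -1):
--             if i == destRow and j == destCol:
--                 dp[i][j] = 1
--             else:
--                 if j == destCol:
--                     dp[i][j] += dp[i + 1][j]
--                 elif i == destRow:
--                     dp[i][j] += dp[i][j + 1]
--                 else:
--                     dp[i][j] += dp[i + 1][j] + dp[i][j + 1]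
--     return dp[0][0]
-- ===== SOURCE B (Python) =====
-- def mazeStepsBU(destRow: int, destCol: int) -> int:
--     k = min(destRow, destCol)
--     m = max(destRow, destCol)
--     res = 1
--     for i in range(1, k + 1):
--         res = res * (m + i) // i
--     return res
-- ===== Notes on version B (the rewrite author's own statement) =====
-- stated objective: faster
-- what changed: Replaces the O(R*C) bottom-up DP table with the closed-form binomial coefficient C(R+C, min(R,C)) computed by a multiplicative loop of min(R,C) exact multiply-divide steps.
import Mathlib
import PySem

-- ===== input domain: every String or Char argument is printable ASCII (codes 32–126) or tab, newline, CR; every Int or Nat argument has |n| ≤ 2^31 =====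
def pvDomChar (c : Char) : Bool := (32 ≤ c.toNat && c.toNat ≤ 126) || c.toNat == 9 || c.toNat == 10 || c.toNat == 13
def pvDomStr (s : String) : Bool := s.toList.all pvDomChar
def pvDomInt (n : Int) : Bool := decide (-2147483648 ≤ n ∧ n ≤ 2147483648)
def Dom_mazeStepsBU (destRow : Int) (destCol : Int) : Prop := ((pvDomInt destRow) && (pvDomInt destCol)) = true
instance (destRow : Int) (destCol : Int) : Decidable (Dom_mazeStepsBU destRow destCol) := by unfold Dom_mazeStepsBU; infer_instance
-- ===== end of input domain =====

-- B replaces A's O(R*C) bottom-up DP table by the closed-form binomial coefficient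
-- C(R+C, min(R,C)) computed with min(R,C) exact multiply-divide steps (objective: faster).

-- ===== PORT A =====
-- dp is a Python list of lists of ints; ported as Array (Array Int) to keep Python's O(1)
-- subscripting. Every dp[i][j] access A makes uses in-range nonnegative indices on inputs
-- satisfying Pre_, so the getD/setIfInBounds defaults are never reached there.
def pvGet2 (dp : Array (Array Int)) (i j : Int) : Int :=
  ((dp[i.toNat]?.getD #[])[j.toNat]?.getD 0)

-- dp[i][j] = v : like Python, the row is updated in place (Array.modify)
def pvSet2 (dp : Array (Array Int)) (i j : Int) (v : Int) : Array (Array Int) :=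
  dp.modify i.toNat (fun row => row.setIfInBounds j.toNat v)

-- the body of A's doubly nested loop, branch for branch
def pvStep (r c : Int) (dp : Array (Array Int)) (i j : Int) : Array (Array Int) :=
  if i = r ∧ j = c then pvSet2 dp i j 1
  else if j = c then pvSet2 dp i j (pvGet2 dp i j + pvGet2 dp (i + 1) j)
  else if i = r then pvSet2 dp i j (pvGet2 dp i j + pvGet2 dp i (j + 1))
  else pvSet2 dp i j (pvGet2 dp i j + (pvGet2 dp (i + 1) j + pvGet2 dp i (j + 1)))

def mazeStepsBU (destRow : Int) (destCol : Int) : Int :=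
  let dp0 := ((PySem.List.pyRange 0 (destRow + 1) 1).map
      (fun _ => ((PySem.List.pyRange 0 (destCol + 1) 1).map (fun _ => (0 : Int))).toArray)).toArray
  let dp := (PySem.List.pyRange destRow (-1) (-1)).foldl
      (fun dp i => (PySem.List.pyRange destCol (-1) (-1)).foldl
        (fun dp j => pvStep destRow destCol dp i j) dp) dp0
  pvGet2 dp 0 0

-- ===== PORT B =====
def mazeStepsBU_alt (destRow : Int) (destCol : Int) : Int :=
  let k := min destRow destCol
  let m := max destRow destCol
  (PySem.List.pyRange 1 (k + 1) 1).foldl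
    (fun res i => PySem.Int.floordiv (res * (m + i)) i) 1

-- ===== PRECONDITION & SPEC =====
-- Pre_ excludes exactly the inputs with a negative coordinate: there Python A raises IndexError
-- (dp[0][0] on an empty/row-empty table).
def Pre_mazeStepsBU (destRow : Int) (destCol : Int) : Prop := 0 ≤ destRow ∧ 0 ≤ destCol
instance (destRow : Int) (destCol : Int) : Decidable (Pre_mazeStepsBU destRow destCol) := by
  unfold Pre_mazeStepsBU; infer_instance
def pvWitness_mazeStepsBU : Int × Int := (2, 3)

def Spec_mazeStepsBU (destRow : Int) (destCol : Int) (out : Int) : Prop := out = mazeStepsBU_alt destRow destCol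
instance (destRow : Int) (destCol : Int) (out : Int) : Decidable (Spec_mazeStepsBU destRow destCol out) := by unfold Spec_mazeStepsBU; infer_instance

-- ===== CLAIM (what is proved, stated in full; the proofs are below) =====
def Claim_equal_mazeStepsBU : Prop := ∀ (destRow : Int) (destCol : Int), Dom_mazeStepsBU destRow destCol → Pre_mazeStepsBU destRow destCol → Spec_mazeStepsBU destRow destCol (mazeStepsBU destRow destCol)

-- ===== LEMMAS AND PROOFS =====

-- the intended value of dp[r][j] : C((R-r)+(C-j), R-r)
def vval (R C r j : Nat) : Int := (((R - r) + (C - j)).choose (R - r) : Int)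

-- row r while the inner loop has filled the entries j ≥ t
def prow (R C r t : Nat) : List Int :=
  (List.range (C + 1)).map (fun j => if t ≤ j then vval R C r j else 0)

-- the whole table: rows above r are still zero, row r is filled from t on, rows below are done
def tbl (R C r t : Nat) : List (List Int) :=
  List.replicate r (List.replicate (C + 1) (0 : Int)) ++
    prow R C r t :: (List.range (R - r)).map (fun k => prow R C (r + 1 + k) 0)

-- the Array mirror of a list-of-lists table
def AofL (l : List (List Int)) : Array (Array Int) := (l.map List.toArray).toArray

lemma prow_top (R C r : Nat) : prow R C r (C + 1) = List.replicate (C + 1) (0 : Int) := by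
  rw [List.eq_replicate_iff]
  constructor
  · simp [prow]
  · intro b hb
    simp only [prow, List.mem_map, List.mem_range] at hb
    obtain ⟨j, hj, hb⟩ := hb
    rw [if_neg (by omega)] at hb
    exact hb.symm

lemma tbl_get?_self (R C r t : Nat) : (tbl R C r t)[r]? = some (prow R C r t) := by
  unfold tbl
  rw [List.getElem?_append_right (by simp)]
  simp

lemma tbl_get?_succ (R C r t : Nat) (h : r < R) :
    (tbl R C r t)[r + 1]? = some (prow R C (r + 1) 0) := by
  unfold tbl
  rw [List.getElem?_append_right (by simp)]
  simp only [List.length_replicate]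
  have : r + 1 - r = 1 := by omega
  rw [this]
  simp [h]

lemma prow_get? (R C r t j : Nat) (hj : j ≤ C) :
    (prow R C r t)[j]? = some (if t ≤ j then vval R C r j else 0) := by
  simp [prow, Nat.lt_succ_iff.mpr hj]

lemma get2_self (R C r t : Nat) (ht : t ≤ C) :
    pvGet2 (AofL (tbl R C r (t + 1))) (r : Int) (t : Int) = 0 := by
  unfold pvGet2 AofL
  rw [Int.toNat_natCast, Int.toNat_natCast,
    List.getElem?_toArray (xs := (tbl R C r (t+1)).map List.toArray), List.getElem?_map,
    tbl_get?_self R C r (t+1)]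
  simp only [Option.map_some, Option.getD_some]
  rw [List.getElem?_toArray (xs := prow R C r (t+1)), prow_get? R C r (t+1) t ht]
  simp

lemma get2_down (R C r t : Nat) (hr : r < R) (ht : t ≤ C) :
    pvGet2 (AofL (tbl R C r (t + 1))) ((r : Int) + 1) (t : Int) = vval R C (r + 1) t := by
  unfold pvGet2 AofL
  have h1 : ((r : Int) + 1) = ((r + 1 : Nat) : Int) := by push_cast; ring
  rw [h1, Int.toNat_natCast, Int.toNat_natCast,
    List.getElem?_toArray (xs := (tbl R C r (t+1)).map List.toArray), List.getElem?_map,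
    tbl_get?_succ R C r (t+1) hr]
  simp only [Option.map_some, Option.getD_some]
  rw [List.getElem?_toArray (xs := prow R C (r+1) 0), prow_get? R C (r+1) 0 t ht]
  simp

lemma get2_right (R C r t : Nat) (ht : t < C) :
    pvGet2 (AofL (tbl R C r (t + 1))) (r : Int) ((t : Int) + 1) = vval R C r (t + 1) := by
  unfold pvGet2 AofL
  have h1 : ((t : Int) + 1) = ((t + 1 : Nat) : Int) := by push_cast; ring
  rw [h1, Int.toNat_natCast, Int.toNat_natCast,
    List.getElem?_toArray (xs := (tbl R C r (t+1)).map List.toArray), List.getElem?_map,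
    tbl_get?_self R C r (t+1)]
  simp only [Option.map_some, Option.getD_some]
  rw [List.getElem?_toArray (xs := prow R C r (t+1)), prow_get? R C r (t+1) (t+1) (by omega)]
  simp

lemma prow_set (R C r t : Nat) :
    (prow R C r (t + 1)).set t (vval R C r t) = prow R C r t := by
  apply List.ext_getElem
  · simp [prow]
  · intro i h1 h2
    simp only [prow, List.length_map, List.length_range] at h1 h2 ⊢
    rw [List.getElem_set]
    by_cases hi : t = i
    · subst hi
      simp
    · simp only [List.getElem_map, List.getElem_range]
      by_cases hti : t ≤ i
      · rw [if_neg hi, if_pos (by omega), if_pos hti]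
      · rw [if_neg hi, if_neg (by omega), if_neg hti]

lemma tbl_set (R C r t : Nat) :
    (tbl R C r (t + 1)).set r (prow R C r t) = tbl R C r t := by
  unfold tbl
  rw [List.set_append_right _ _ (by simp)]
  simp

lemma tbl_length (R C r t : Nat) : (tbl R C r t).length = r + 1 + (R - r) := by
  simp [tbl]
  omega

lemma tbl_getElem_self (R C r t : Nat) (h : r < (tbl R C r t).length) :
    (tbl R C r t)[r] = prow R C r t := by
  have h1 := tbl_get?_self R C r t
  rw [List.getElem?_eq_getElem h] at h1
  exact Option.some.inj h1

lemma set2_eq (R C r t : Nat) :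
    pvSet2 (AofL (tbl R C r (t + 1))) (r : Int) (t : Int) (vval R C r t) = AofL (tbl R C r t) := by
  unfold pvSet2 AofL
  apply Array.ext'
  rw [Array.toList_modify, List.toList_toArray, List.toList_toArray]
  rw [Int.toNat_natCast, Int.toNat_natCast]
  have hlt : r < ((tbl R C r (t + 1)).map List.toArray).length := by
    rw [List.length_map, tbl_length]; omega
  rw [List.modify_eq_set_get _ hlt, List.get_eq_getElem, List.getElem_map,
    tbl_getElem_self R C r (t + 1) (by rw [tbl_length]; omega)]
  rw [List.setIfInBounds_toArray (prow R C r (t+1)), prow_set R C r t,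
    ← List.map_set, tbl_set R C r t]

lemma vval_pascal (R C r t : Nat) (hr : r < R) (ht : t < C) :
    vval R C (r + 1) t + vval R C r (t + 1) = vval R C r t := by
  obtain ⟨a, ha⟩ : ∃ a, R - r = a + 1 := ⟨R - r - 1, by omega⟩
  obtain ⟨b, hb⟩ : ∃ b, C - t = b + 1 := ⟨C - t - 1, by omega⟩
  have h1 : R - (r + 1) = a := by omega
  have h2 : C - (t + 1) = b := by omega
  unfold vval
  rw [ha, hb, h1, h2]
  have e1 : a + (b + 1) = a + b + 1 := by omega
  have e2 : a + 1 + b = a + b + 1 := by omega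
  have e3 : a + 1 + (b + 1) = a + b + 1 + 1 := by omega
  rw [e1, e2, e3, Nat.choose_succ_succ (a + b + 1) a]
  push_cast
  ring

lemma step_eq (R C r t : Nat) (hr : r ≤ R) (ht : t ≤ C) :
    pvStep (R : Int) (C : Int) (AofL (tbl R C r (t + 1))) (r : Int) (t : Int) = AofL (tbl R C r t) := by
  unfold pvStep
  by_cases h1 : r = R <;> by_cases h2 : t = C
  · subst h1; subst h2
    rw [if_pos ⟨rfl, rfl⟩]
    have hv : (1 : Int) = vval r t r t := by simp [vval]
    rw [hv]
    exact set2_eq r t r t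
  · subst h1
    rw [if_neg (by simp [h2]), if_neg (by simp [h2]), if_pos rfl]
    rw [get2_self r C r t ht, get2_right r C r t (by omega)]
    have hv : (0 : Int) + vval r C r (t + 1) = vval r C r t := by simp [vval]
    rw [hv]
    exact set2_eq r C r t
  · subst h2
    rw [if_neg (by simp [h1]), if_pos rfl]
    rw [get2_self R t r t le_rfl, get2_down R t r t (by omega) le_rfl]
    have hv : (0 : Int) + vval R t (r + 1) t = vval R t r t := by simp [vval]
    rw [hv]
    exact set2_eq R t r t
  · rw [if_neg (by simp [h1, h2]), if_neg (by simp [h2]), if_neg (by simp [h1])]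
    rw [get2_self R C r t ht, get2_down R C r t (by omega) ht, get2_right R C r t (by omega)]
    have hv : (0 : Int) + (vval R C (r + 1) t + vval R C r (t + 1)) = vval R C r t := by
      rw [zero_add, vval_pascal R C r t (by omega) (by omega)]
    rw [hv]
    exact set2_eq R C r t

lemma inner_fold (R C r : Nat) (hr : r ≤ R) (t : Nat) (htc : t ≤ C + 1) :
    (PySem.List.pyRange ((t : Int) - 1) (-1) (-1)).foldl
      (fun dp j => pvStep (R : Int) (C : Int) dp (r : Int) j) (AofL (tbl R C r t)) = AofL (tbl R C r 0) := by
  induction t with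
  | zero =>
    rw [show ((0 : Nat) : Int) - 1 = -1 by simp, PySem.List.pyRange_neg_one_eq_nil (le_refl _)]
    rfl
  | succ t ih =>
    have hc : (((t + 1 : Nat)) : Int) - 1 = (t : Int) := by push_cast; ring
    rw [hc, PySem.List.pyRange_neg_one_cons (by omega : (-1 : Int) < (t : Int))]
    simp only [List.foldl_cons]
    rw [step_eq R C r t hr (by omega)]
    exact ih (by omega)

lemma inner_full (R C r : Nat) (hr : r ≤ R) :
    (PySem.List.pyRange (C : Int) (-1) (-1)).foldl
      (fun dp j => pvStep (R : Int) (C : Int) dp (r : Int) j) (AofL (tbl R C r (C + 1))) = AofL (tbl R C r 0) := by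
  have h := inner_fold R C r hr (C + 1) (le_refl _)
  have hc : (((C + 1 : Nat)) : Int) - 1 = (C : Int) := by push_cast; ring
  rwa [hc] at h

lemma tbl_shift (R C r : Nat) (h : r < R) : tbl R C (r + 1) 0 = tbl R C r (C + 1) := by
  unfold tbl
  rw [prow_top, List.replicate_succ']
  have h1 : R - r = (R - (r + 1)) + 1 := by omega
  rw [h1, List.range_succ_eq_map, List.map_cons, List.map_map]
  simp only [List.append_assoc, List.cons_append, List.nil_append, Nat.add_zero]
  congr 3
  apply List.map_congr_left
  intro k _
  simp only [Function.comp_apply, Nat.succ_eq_add_one]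
  have : r + 1 + 1 + k = r + 1 + (k + 1) := by omega
  rw [this]

lemma outer_fold (R C r : Nat) (hr : r ≤ R) :
    (PySem.List.pyRange (r : Int) (-1) (-1)).foldl
      (fun dp i => (PySem.List.pyRange (C : Int) (-1) (-1)).foldl
        (fun dp j => pvStep (R : Int) (C : Int) dp i j) dp) (AofL (tbl R C r (C + 1))) = AofL (tbl R C 0 0) := by
  induction r with
  | zero =>
    rw [PySem.List.pyRange_neg_one_cons (by omega : (-1 : Int) < ((0 : Nat) : Int))]
    rw [show ((0 : Nat) : Int) - 1 = -1 by simp, PySem.List.pyRange_neg_one_eq_nil (le_refl _)]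
    simp only [List.foldl_cons, List.foldl_nil]
    exact inner_full R C 0 (by omega)
  | succ r ih =>
    rw [PySem.List.pyRange_neg_one_cons (by omega : (-1 : Int) < ((r + 1 : Nat) : Int))]
    simp only [List.foldl_cons]
    rw [inner_full R C (r + 1) hr, tbl_shift R C r (by omega)]
    have hc : (((r + 1 : Nat)) : Int) - 1 = (r : Int) := by push_cast; ring
    rw [hc]
    exact ih (by omega)

lemma A_eq (R C : Nat) : mazeStepsBU (R : Int) (C : Int) = (((R + C).choose R : Nat) : Int) := by
  unfold mazeStepsBU
  have hlen1 : (PySem.List.pyRange 0 ((R : Int) + 1) 1).length = R + 1 := by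
    rw [PySem.List.length_pyRange_one]; omega
  have hlen2 : (PySem.List.pyRange 0 ((C : Int) + 1) 1).length = C + 1 := by
    rw [PySem.List.length_pyRange_one]; omega
  have hdp0 : (PySem.List.pyRange 0 ((R : Int) + 1) 1).map
      (fun _ => (PySem.List.pyRange 0 ((C : Int) + 1) 1).map (fun _ => (0 : Int)))
      = tbl R C R (C + 1) := by
    rw [List.map_const', List.map_const', hlen1, hlen2]
    unfold tbl
    rw [prow_top, Nat.sub_self, List.replicate_succ']
    simp
  have hdp0A : ((PySem.List.pyRange 0 ((R : Int) + 1) 1).map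
      (fun _ => ((PySem.List.pyRange 0 ((C : Int) + 1) 1).map (fun _ => (0 : Int))).toArray)).toArray
      = AofL (tbl R C R (C + 1)) := by
    unfold AofL
    rw [← hdp0, List.map_map]
    rfl
  rw [hdp0A]
  simp only [outer_fold R C R (le_refl R)]
  unfold pvGet2 AofL
  have h0 : (prow R C 0 0)[(0 : Nat)]? = some (vval R C 0 0) := by
    rw [prow_get? R C 0 0 0 (by omega)]; simp
  simp only [Int.toNat_zero]
  rw [List.getElem?_toArray (xs := (tbl R C 0 0).map List.toArray), List.getElem?_map,
    tbl_get?_self R C 0 0]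
  simp only [Option.map_some, Option.getD_some]
  rw [List.getElem?_toArray (xs := prow R C 0 0), h0]
  simp [vval]

lemma B_fold (m n : Nat) :
    ((List.range n).map (fun (k : Nat) => (1 : Int) + (k : Int))).foldl
      (fun res i => PySem.Int.floordiv (res * ((m : Int) + i)) i) 1 = (((m + n).choose n : Nat) : Int) := by
  induction n with
  | zero => simp
  | succ n ih =>
    rw [List.range_succ, List.map_append, List.foldl_append, ih]
    simp only [List.map_cons, List.map_nil, List.foldl_cons, List.foldl_nil]
    have h1 : ((m : Int) + (1 + (n : Int))) = ((m + n + 1 : Nat) : Int) := by push_cast; ring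
    have h2 : ((1 : Int) + (n : Int)) = ((n + 1 : Nat) : Int) := by push_cast; ring
    rw [h1, h2]
    have hnat : (m + n).choose n * (m + n + 1) = (m + n + 1).choose (n + 1) * (n + 1) := by
      rw [mul_comm]; exact Nat.add_one_mul_choose_eq (m + n) n
    have key : (((m + n).choose n : Nat) : Int) * ((m + n + 1 : Nat) : Int)
        = (((m + n + 1).choose (n + 1) : Nat) : Int) * ((n + 1 : Nat) : Int) := by
      exact_mod_cast hnat
    rw [key, PySem.Int.floordiv_eq_ediv_of_pos (by exact_mod_cast Nat.succ_pos n)]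
    rw [Int.mul_ediv_cancel _ (by exact_mod_cast Nat.succ_ne_zero n)]
    rfl

lemma B_eq (R C : Nat) : mazeStepsBU_alt (R : Int) (C : Int) = (((R + C).choose R : Nat) : Int) := by
  unfold mazeStepsBU_alt
  dsimp only
  rcases le_total R C with h | h
  · rw [min_eq_left (by exact_mod_cast h : (R : Int) ≤ (C : Int)),
        max_eq_right (by exact_mod_cast h : (R : Int) ≤ (C : Int))]
    rw [PySem.List.pyRange_one]
    have hn : ((R : Int) + 1 - 1).toNat = R := by omega
    rw [hn, B_fold C R]
    rw [Nat.add_comm C R]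
  · rw [min_eq_right (by exact_mod_cast h : (C : Int) ≤ (R : Int)),
        max_eq_left (by exact_mod_cast h : (C : Int) ≤ (R : Int))]
    rw [PySem.List.pyRange_one]
    have hn : ((C : Int) + 1 - 1).toNat = C := by omega
    rw [hn, B_fold R C]
    have : (R + C).choose C = (R + C).choose R := by
      rw [← Nat.choose_symm (Nat.le_add_right R C)]
      congr 1
      omega
    rw [this]

-- ===== VERDICT (by name: the statement is the Claim_ definition above) =====
theorem mazeStepsBU_spec : Claim_equal_mazeStepsBU := by
  intro destRow destCol _ hpre
  unfold Spec_mazeStepsBU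
  obtain ⟨hr, hc⟩ := hpre
  have hR : destRow = ((destRow.toNat : Nat) : Int) := (Int.toNat_of_nonneg hr).symm
  have hC : destCol = ((destCol.toNat : Nat) : Int) := (Int.toNat_of_nonneg hc).symm
  rw [hR, hC, A_eq, B_eq]
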